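-- pv_equiv track=rewrite | github.com/luffy2106/text_mining | code/author.py | remove_note
-- ===== SOURCE A (Python) =====
-- def find_parenthesis(text):
--     """
--     Find positions a pair of parenthesis '(' and ')' in a string
--     """
--     begin_pos = text.find('(')
--     if begin_pos == -1:
--         return (-1, -1)
--     else:
--         enter = 1
--         end_pos = -1
--         for i in range(begin_pos+1, len(text)):
--             if text[i] == ')':
--                 enter -= 1
--             if text[i] == '(':
--                 enter += 1
--             if enter == 0:
--                 end_pos = i
--                 break
--         return (begin_pos, end_pos)
--
-- def remove_note(text):
--     """
--     Remove parts of text that are between two parenthesis.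
--     """
--     cleaned_text = text
--     while True:
--         pos = find_parenthesis(cleaned_text)
--         if pos[0] == -1:
--             break
--         elif pos[1] == -1:
--             cleaned_text = cleaned_text[:pos[0]]
--         else:
--             cleaned_text = cleaned_text.replace(cleaned_text[pos[0]: pos[1]+1],
--                                                 '')
--     return cleaned_text
-- ===== SOURCE B (Python) =====
-- def remove_note(text):
--     """
--     Remove parts of text that are between two parenthesis.
--     One linear pass with a depth counter: characters are kept only at
--     depth 0; an unmatched '(' keeps depth positive to the end, so the
--     tail after it is dropped (matching the truncation behaviour).
--     """
--     depth = 0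
--     out = []
--     for c in text:
--         if c == '(':
--             depth += 1
--         elif c == ')' and depth > 0:
--             depth -= 1
--         elif depth == 0:
--             out.append(c)
--     return ''.join(out)
-- ===== Notes on version B (the rewrite author's own statement) =====
-- stated objective: simpler
-- what changed: Replaced the repeated find-first-balanced-group-then-replace-all loop by a single left-to-right pass with an integer depth counter that emits characters only at depth 0.
import Mathlib
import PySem

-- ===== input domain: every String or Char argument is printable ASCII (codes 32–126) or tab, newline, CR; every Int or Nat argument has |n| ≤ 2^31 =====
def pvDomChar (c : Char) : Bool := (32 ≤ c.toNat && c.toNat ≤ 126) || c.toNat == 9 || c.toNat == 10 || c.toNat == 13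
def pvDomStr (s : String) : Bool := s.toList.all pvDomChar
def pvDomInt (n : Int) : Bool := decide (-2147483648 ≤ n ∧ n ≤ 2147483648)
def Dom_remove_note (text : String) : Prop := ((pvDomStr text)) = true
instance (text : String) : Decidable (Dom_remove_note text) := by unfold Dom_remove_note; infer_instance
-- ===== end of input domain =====

-- B replaces A's repeated find-group / replace-all loop by one linear pass with a depth counter (simpler; same return value).

-- ===== PORT A =====
-- for i in range(begin_pos+1, len(text)) with break: index recursion (exact)
def fpLoop (text : List Char) (i : Nat) (enter : Int) : Int :=
  if h : i < text.length then
    let c := text[i]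
    let enter1 := if c = ')' then enter - 1 else enter
    let enter2 := if c = '(' then enter1 + 1 else enter1
    if enter2 = 0 then (i : Int) else fpLoop text (i + 1) enter2
  else (-1)
termination_by text.length - i

def find_parenthesis (text : List Char) : Int × Int :=
  let begin_pos := PySem.Chars.find text ['(']
  if begin_pos = -1 then (-1, -1)
  else (begin_pos, fpLoop text (begin_pos.toNat + 1) 1)

-- 'while True' ported with fuel; length+1 iterations always suffice (each
-- recursive step strictly shortens the string), which the proof establishes.
def rmLoop : Nat → List Char → List Char
  | 0, cleaned => cleaned
  | fuel + 1, cleaned =>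
    let pos := find_parenthesis cleaned
    if pos.1 = -1 then cleaned
    else if pos.2 = -1 then
      rmLoop fuel (PySem.Chars.slice cleaned none (some pos.1))
    else
      rmLoop fuel (PySem.Chars.replace cleaned
        (PySem.Chars.slice cleaned (some pos.1) (some (pos.2 + 1))) [])

def remove_note (text : String) : String :=
  String.ofList (rmLoop (text.toList.length + 1) text.toList)

-- ===== PORT B =====
def remove_note_alt (text : String) : String :=
  let st := text.toList.foldl
    (fun (st : Int × List Char) c =>
      if c = '(' then (st.1 + 1, st.2)
      else if c = ')' ∧ 0 < st.1 then (st.1 - 1, st.2)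
      else if st.1 = 0 then (st.1, st.2 ++ [c])
      else st)
    ((0 : Int), ([] : List Char))
  String.ofList st.2

-- ===== PRECONDITION & SPEC =====
def Spec_remove_note (text : String) (out : String) : Prop := out = remove_note_alt text
instance (text : String) (out : String) : Decidable (Spec_remove_note text out) := by unfold Spec_remove_note; infer_instance

-- ===== CLAIM (what is proved, stated in full; the proofs are below) =====
def Claim_equal_remove_note : Prop := ∀ (text : String), Dom_remove_note text → Spec_remove_note text (remove_note text)

-- ===== LEMMAS AND PROOFS =====

-- depth delta of one character
def pvDelta (c : Char) : Int := if c = '(' then 1 else if c = ')' then -1 else 0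

def pvBal (l : List Char) : Int := (l.map pvDelta).sum

-- B's pass as a structural recursion on the remaining characters
def pvClean : Int → List Char → List Char
  | _, [] => []
  | d, c :: t =>
    if c = '(' then pvClean (d + 1) t
    else if c = ')' ∧ 0 < d then pvClean (d - 1) t
    else if d = 0 then c :: pvClean d t
    else pvClean d t

-- remove all (leftmost, non-overlapping) occurrences of g: spec of str.replace(g, '')
def pvRmAll (g : List Char) : List Char → List Char
  | [] => []
  | c :: t =>
    if g.isPrefixOf (c :: t) then pvRmAll g (t.drop (g.length - 1))
    else c :: pvRmAll g t
termination_by l => l.length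
decreasing_by
  · simpa using Nat.lt_succ_of_le (Nat.sub_le _ _ |>.trans (by simp [List.length_drop]; omega))
  · simp

-- first index (0-based in r) at which the running counter hits 0
def pvScanZ (e : Int) : List Char → Option Nat
  | [] => none
  | c :: t =>
    if e + pvDelta c = 0 then some 0
    else (pvScanZ (e + pvDelta c) t).map (· + 1)

theorem pvBal_nil : pvBal [] = 0 := rfl
theorem pvBal_cons (c : Char) (t : List Char) : pvBal (c :: t) = pvDelta c + pvBal t := by
  simp [pvBal]
theorem pvDelta_abs (c : Char) : pvDelta c = 1 ∨ pvDelta c = -1 ∨ pvDelta c = 0 := by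
  unfold pvDelta; split_ifs <;> simp

-- B's foldl equals pvClean
theorem pvFoldl_clean (l : List Char) : ∀ (d : Int) (acc : List Char),
    (l.foldl
      (fun (st : Int × List Char) c =>
        if c = '(' then (st.1 + 1, st.2)
        else if c = ')' ∧ 0 < st.1 then (st.1 - 1, st.2)
        else if st.1 = 0 then (st.1, st.2 ++ [c])
        else st)
      (d, acc)).2 = acc ++ pvClean d l := by
  induction l with
  | nil => intro d acc; simp [pvClean]
  | cons c t ih =>
    intro d acc
    simp only [List.foldl_cons, pvClean]
    by_cases h1 : c = '('
    · simp [h1, ih]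
    · by_cases h2 : c = ')' ∧ 0 < d
      · simp [h1, h2, ih]
      · by_cases h3 : d = 0
        · simp [h1, h2, h3, ih]
        · simp [h1, h2, h3, ih]

-- core traversal lemma: inside a region whose running balance stays ≥ 1, the pass
-- emits nothing and ends at depth d + pvBal m
theorem pvClean_inside : ∀ (m v : List Char) (d : Int), 1 ≤ d →
    (∀ p, p <+: m → p ≠ m → 1 ≤ d + pvBal p) →
    pvClean d (m ++ v) = pvClean (d + pvBal m) v := by
  intro m
  induction m with
  | nil => intro v d _ _; simp [pvBal_nil]
  | cons c t ih =>
    intro v d hd hp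
    simp only [List.cons_append, pvClean, pvBal_cons]
    by_cases h1 : c = '('
    · rw [if_pos h1]
      rw [ih v (d + 1) (by omega) ?_]
      · congr 1; simp [h1, pvDelta]; ring
      · intro p hpre hne
        have := hp (c :: p) (by simpa using hpre) (by simp [hne])
        simp [pvBal_cons, h1, pvDelta] at this; omega
    · by_cases h2 : c = ')'
      · rw [if_neg h1, if_pos ⟨h2, by omega⟩]
        rcases eq_or_ne t [] with rfl | ht
        · simp only [List.nil_append]
          congr 1; simp [pvBal_nil, h2, h1, pvDelta]; ring
        · rw [ih v (d - 1) ?_ ?_]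
          · congr 1; simp [h2, h1, pvDelta]; ring
          · have := hp [c] ⟨t, rfl⟩ (by simp [ht])
            simp [pvBal_cons, pvBal_nil, h2, h1, pvDelta] at this; omega
          · intro p hpre hne
            have := hp (c :: p) (by simpa using hpre) (by simp [hne])
            simp [pvBal_cons, h2, h1, pvDelta] at this ⊢; omega
      · rw [if_neg h1, if_neg (by simp [h2]), if_neg (by omega)]
        rw [ih v d hd ?_]
        · congr 1; simp [h1, h2, pvDelta]
        · intro p hpre hne
          have := hp (c :: p) (by simpa using hpre) (by simp [hne])
          simpa [pvBal_cons, h1, h2, pvDelta] using this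

-- a balanced group: '(' then a block of net balance -1 whose proper prefixes stay ≥ 0
def pvGrp (g : List Char) : Prop :=
  ∃ m, g = '(' :: m ∧ pvBal m = -1 ∧ ∀ p, p <+: m → p ≠ m → 0 ≤ pvBal p

theorem pvClean_group_append (g v : List Char) (d : Int) (hd : 0 ≤ d) (hg : pvGrp g) :
    pvClean d (g ++ v) = pvClean d v := by
  obtain ⟨m, rfl, hbal, hpre⟩ := hg
  simp only [List.cons_append, pvClean, if_true]
  rw [pvClean_inside m v (d + 1) (by omega) ?_]
  · rw [hbal, show d + 1 + (-1 : Int) = d from by ring]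
  · intro p hp hne; have := hpre p hp hne; omega

-- if the running balance stays ≥ 1 on every prefix, everything is skipped
theorem pvClean_dead : ∀ (r : List Char) (d : Int),
    (∀ p, p <+: r → 1 ≤ d + pvBal p) → pvClean d r = [] := by
  intro r
  induction r with
  | nil => intro d _; rfl
  | cons c t ih =>
    intro d hp
    have hd : 1 ≤ d := by simpa [pvBal_nil] using hp [] (by simp)
    simp only [pvClean]
    by_cases h1 : c = '('
    · rw [if_pos h1]
      exact ih (d + 1) fun p hpre => by
        have := hp (c :: p) (by simpa using hpre)
        simp [pvBal_cons, h1, pvDelta] at this; omega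
    · by_cases h2 : c = ')'
      · rw [if_neg h1, if_pos ⟨h2, by omega⟩]
        exact ih (d - 1) fun p hpre => by
          have := hp (c :: p) (by simpa using hpre)
          simp [pvBal_cons, h1, h2, pvDelta] at this; omega
      · rw [if_neg h1, if_neg (by simp [h2]), if_neg (by omega)]
        exact ih d fun p hpre => by
          have := hp (c :: p) (by simpa using hpre)
          simpa [pvBal_cons, h1, h2, pvDelta] using this

-- at depth 0, a '('-free block passes through unchanged
theorem pvClean_no_open : ∀ (u : List Char), '(' ∉ u → ∀ w, pvClean 0 (u ++ w) = u ++ pvClean 0 w := by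
  intro u
  induction u with
  | nil => intro _ w; simp
  | cons c t ih =>
    intro hmem w
    have hc : c ≠ '(' := by intro h; exact hmem (by simp [h])
    have ht : '(' ∉ t := fun h => hmem (by simp [h])
    simp only [List.cons_append, pvClean]
    simp only [if_neg hc]
    simp [ih ht w]

theorem pvRmAll_length_le (g : List Char) : ∀ l, (pvRmAll g l).length ≤ l.length := by
  intro l
  induction l using pvRmAll.induct g with
  | case1 => simp [pvRmAll]
  | case2 c t h ih =>
    rw [pvRmAll, if_pos h]
    calc (pvRmAll g (t.drop (g.length - 1))).length ≤ (t.drop (g.length - 1)).length := ih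
    _ ≤ (c :: t).length := by simp; omega
  | case3 c t h ih =>
    rw [pvRmAll, if_neg h]
    simpa using ih

theorem pvRmAll_length_lt (g : List Char) (hg : g ≠ []) : ∀ l, g <:+: l → (pvRmAll g l).length < l.length := by
  intro l
  induction l with
  | nil => intro h; simp at h; exact absurd h hg
  | cons c t ih =>
    intro hinf
    by_cases h : g.isPrefixOf (c :: t)
    · rw [pvRmAll, if_pos h]
      have h1 := pvRmAll_length_le g (t.drop (g.length - 1))
      have hg1 : 1 ≤ g.length := List.length_pos_iff.2 hg
      simp only [List.length_drop, List.length_cons] at *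
      omega
    · rw [pvRmAll, if_neg h]
      have hgt : g <:+: t := by
        rcases hinf with ⟨u, v, huv⟩
        cases u with
        | nil => exact absurd (List.isPrefixOf_iff_prefix.2 ⟨v, by simpa using huv⟩) h
        | cons x u' =>
          refine ⟨u', v, ?_⟩
          have := congrArg List.tail huv
          simpa using this
      simpa using Nat.succ_lt_succ (ih hgt)

-- removing occurrences of a balanced group does not change the pass's output
theorem pvClean_rmAll (g : List Char) (hg : pvGrp g) : ∀ (n : Nat) (l : List Char) (d : Int),
    l.length ≤ n → 0 ≤ d → pvClean d (pvRmAll g l) = pvClean d l := by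
  have hg1 : 1 ≤ g.length := by
    obtain ⟨m, rfl, _, _⟩ := hg; simp
  intro n
  induction n with
  | zero =>
    intro l d hl _
    have : l = [] := List.length_eq_zero_iff.1 (Nat.le_zero.1 hl)
    subst this; rw [pvRmAll]
  | succ n ih =>
    intro l d hl hd
    cases l with
    | nil => rw [pvRmAll]
    | cons c t =>
      by_cases h : g.isPrefixOf (c :: t)
      · rw [pvRmAll, if_pos h]
        have hsplit : c :: t = g ++ (t.drop (g.length - 1)) := by
          obtain ⟨v, hv⟩ := List.isPrefixOf_iff_prefix.1 h
          have hv2 : (c :: t).drop g.length = v := by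
            rw [← hv]; simp
          have hd2 : (c :: t).drop g.length = t.drop (g.length - 1) := by
            conv_lhs => rw [show g.length = (g.length - 1) + 1 from by omega]
            rw [List.drop_succ_cons]
          rw [← hv, ← hv2, hd2]
        rw [ih (t.drop (g.length - 1)) d (by simp only [List.length_drop]; simp at hl; omega) hd]
        conv_rhs => rw [hsplit]
        rw [pvClean_group_append g _ d hd hg]
      · rw [pvRmAll, if_neg h]
        simp only [pvClean]
        by_cases h1 : c = '('
        · simp only [if_pos h1]
          exact ih t (d + 1) (by simpa using hl) (by omega)
        · by_cases h2 : c = ')' ∧ 0 < d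
          · simp only [if_neg h1, if_pos h2]
            exact ih t (d - 1) (by simpa using hl) (by omega)
          · by_cases h3 : d = 0
            · simp only [if_neg h1, if_neg h2, if_pos h3]
              rw [ih t d (by simpa using hl) hd]
            · simp only [if_neg h1, if_neg h2, if_neg h3]
              exact ih t d (by simpa using hl) hd

-- str.replace(old, '') (PySem's fuel-based go) computes pvRmAll
theorem pvGo_eq (g : List Char) (hg : g ≠ []) : ∀ (fuel : Nat) (l acc : List Char),
    l.length ≤ fuel →
    PySem.Chars.replace.go g [] fuel l acc = acc.reverse ++ pvRmAll g l := by
  have hg1 : 1 ≤ g.length := List.length_pos_iff.2 hg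
  intro fuel
  induction fuel with
  | zero =>
    intro l acc hl
    have : l = [] := List.length_eq_zero_iff.1 (Nat.le_zero.1 hl)
    subst this
    simp [PySem.Chars.replace.go, pvRmAll]
  | succ fuel ih =>
    intro l acc hl
    cases l with
    | nil => simp [PySem.Chars.replace.go, pvRmAll]
    | cons c t =>
      rw [PySem.Chars.replace.go]
      by_cases h : g.isPrefixOf (c :: t)
      · rw [if_pos h, pvRmAll, if_pos h]
        have hdrop : List.drop g.length (c :: t) = t.drop (g.length - 1) := by
          conv_lhs => rw [show g.length = (g.length - 1) + 1 from by omega]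
          rw [List.drop_succ_cons]
        rw [hdrop]
        have hlen : (t.drop (g.length - 1)).length ≤ fuel := by
          simp only [List.length_drop]
          simp at hl; omega
        simpa using ih (t.drop (g.length - 1)) acc hlen
      · rw [if_neg h, pvRmAll, if_neg h]
        rw [ih t (c :: acc) (by simpa using hl)]
        simp

theorem pvReplace_eq (g l : List Char) (hg : g ≠ []) :
    PySem.Chars.replace l g [] = pvRmAll g l := by
  rw [PySem.Chars.replace]
  rw [if_neg (by simpa using hg)]
  simpa using pvGo_eq g hg l.length l [] le_rfl

-- if the scan never hits zero, every prefix keeps the counter ≥ 1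
theorem pvScanZ_none_ge : ∀ (r : List Char) (e : Int), 1 ≤ e → pvScanZ e r = none →
    ∀ p, p <+: r → 1 ≤ e + pvBal p := by
  intro r
  induction r with
  | nil =>
    intro e he _ p hp
    rw [List.prefix_nil.1 hp]; simpa [pvBal_nil] using he
  | cons c t ih =>
    intro e he hs p hp
    rw [pvScanZ] at hs
    by_cases hz : e + pvDelta c = 0
    · rw [if_pos hz] at hs; exact absurd hs (by simp)
    · rw [if_neg hz] at hs
      have hs' : pvScanZ (e + pvDelta c) t = none := by
        cases hx : pvScanZ (e + pvDelta c) t with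
        | none => rfl
        | some k => rw [hx] at hs; simp at hs
      have he' : 1 ≤ e + pvDelta c := by
        rcases pvDelta_abs c with h | h | h <;> omega
      cases hp' : p with
      | nil => simpa [pvBal_nil] using he
      | cons x q =>
        subst hp'
        obtain ⟨hx, hq⟩ := List.cons_prefix_cons.1 hp
        have hiq := ih (e + pvDelta c) he' hs' q hq
        rw [pvBal_cons, hx]; omega

-- if the scan first hits zero at k: k is in range, the balance through k is -1
-- relative to e, and every earlier prefix keeps the counter ≥ 1
theorem pvScanZ_some : ∀ (r : List Char) (e : Int) (k : Nat), pvScanZ e r = some k →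
    k < r.length ∧ e + pvBal (r.take (k + 1)) = 0 ∧
      (1 ≤ e → ∀ j, j ≤ k → 1 ≤ e + pvBal (r.take j)) := by
  intro r
  induction r with
  | nil => intro e k h; rw [pvScanZ] at h; exact absurd h (by simp)
  | cons c t ih =>
    intro e k h
    rw [pvScanZ] at h
    by_cases hz : e + pvDelta c = 0
    · rw [if_pos hz] at h
      have hk : k = 0 := by injection h with h'; omega
      subst hk
      refine ⟨by simp, ?_, ?_⟩
      · simpa [pvBal_cons, pvBal_nil] using hz
      · intro he j hj
        have : j = 0 := Nat.le_zero.1 hj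
        subst this; simpa [pvBal_nil] using he
    · rw [if_neg hz] at h
      obtain ⟨k', hk', rfl⟩ := Option.map_eq_some_iff.1 h
      obtain ⟨h1, h2, h3⟩ := ih (e + pvDelta c) k' hk'
      refine ⟨by simp; omega, ?_, ?_⟩
      · rw [List.take_succ_cons, pvBal_cons]; omega
      · intro he j hj
        have he' : 1 ≤ e + pvDelta c := by
          rcases pvDelta_abs c with h | h | h <;> omega
        cases j with
        | zero => simpa [pvBal_nil] using he
        | succ j' =>
          rw [List.take_succ_cons, pvBal_cons]
          have := h3 he' j' (by omega)
          omega

-- A's index loop computes the first zero of the running counter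
theorem pvFpLoop_eq (text : List Char) : ∀ (n i : Nat) (e : Int), text.length - i ≤ n →
    fpLoop text i e = (match pvScanZ e (text.drop i) with
      | none => (-1 : Int)
      | some k => ((i + k : Nat) : Int)) := by
  intro n
  induction n with
  | zero =>
    intro i e hn
    have hge : text.length ≤ i := by omega
    rw [fpLoop, dif_neg (by omega), List.drop_eq_nil_of_le hge, pvScanZ]
  | succ n ih =>
    intro i e hn
    by_cases h : i < text.length
    · rw [fpLoop, dif_pos h]
      show (if (if text[i] = '(' then (if text[i] = ')' then e - 1 else e) + 1
              else (if text[i] = ')' then e - 1 else e)) = 0 then ((i : Nat) : Int)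
            else fpLoop text (i + 1)
              (if text[i] = '(' then (if text[i] = ')' then e - 1 else e) + 1
               else (if text[i] = ')' then e - 1 else e))) = _
      have hdrop : text.drop i = text[i] :: text.drop (i + 1) :=
        List.drop_eq_getElem_cons h
      rw [hdrop, pvScanZ]
      have hcomb :
          (if text[i] = '(' then (if text[i] = ')' then e - 1 else e) + 1
           else (if text[i] = ')' then e - 1 else e)) = e + pvDelta text[i] := by
        unfold pvDelta; split_ifs <;> simp_all <;> ring
      rw [hcomb]
      by_cases hz : e + pvDelta text[i] = 0
      · rw [if_pos hz, if_pos hz]; simp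
      · rw [if_neg hz, if_neg hz]
        rw [ih (i + 1) (e + pvDelta text[i]) (by omega)]
        cases hx : pvScanZ (e + pvDelta text[i]) (text.drop (i + 1)) with
        | none => simp
        | some k => simp; push_cast; ring
    · rw [fpLoop, dif_neg h, List.drop_eq_nil_of_le (by omega), pvScanZ]

-- '(' occurs in l iff ['('] is an infix
theorem pvMem_iff_infix (l : List Char) : '(' ∈ l ↔ ['('] <:+: l := by
  constructor
  · intro h
    obtain ⟨s, t, rfl⟩ := List.append_of_mem h
    exact ⟨s, t, by simp⟩
  · intro ⟨s, t, h⟩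
    subst h; simp

-- what str.find('(') = b ≥ 0 gives: a valid index, a '(' there, none before
theorem pvFind_spec (l : List Char) (hb : PySem.Chars.find l ['('] ≠ -1) :
    (PySem.Chars.find l ['(']).toNat < l.length ∧
    l.drop (PySem.Chars.find l ['(']).toNat =
      '(' :: l.drop ((PySem.Chars.find l ['(']).toNat + 1) ∧
    '(' ∉ l.take (PySem.Chars.find l ['(']).toNat := by
  have h0 : 0 ≤ PySem.Chars.find l ['('] :=
    (PySem.Chars.find_nonneg_iff l ['(']).2 ((PySem.Chars.find_ne_neg_one_iff l ['(']).1 hb)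
  obtain ⟨hpre, hmin⟩ := PySem.Chars.find_spec h0
  set b := (PySem.Chars.find l ['(']).toNat with hbdef
  obtain ⟨ys, hy⟩ := hpre
  have hblt : b < l.length := by
    by_contra hge
    rw [List.drop_eq_nil_of_le (by omega)] at hy
    simp at hy
  have hhead : l[b] = '(' := by
    have h2 := hy
    rw [List.drop_eq_getElem_cons hblt] at h2
    injection h2 with h1 _
    exact h1.symm
  have hcons : l.drop b = '(' :: l.drop (b + 1) := by
    rw [List.drop_eq_getElem_cons hblt, hhead]
  refine ⟨hblt, hcons, ?_⟩
  intro hmem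
  obtain ⟨i, hi, hieq⟩ := List.mem_iff_getElem.1 hmem
  have hib : i < b := by simpa using hi.trans_le (by simp)
  have hil : i < l.length := by omega
  have : ['('] <+: l.drop i := by
    rw [List.drop_eq_getElem_cons hil]
    have : l[i] = '(' := by rwa [List.getElem_take] at hieq
    rw [this]
    exact ⟨l.drop (i + 1), rfl⟩
  exact hmin i hib this

theorem pvClean_open (r : List Char) (d : Int) : pvClean d ('(' :: r) = pvClean (d + 1) r := by
  simp [pvClean]

-- the while-loop, run with enough fuel, computes the one-pass result
theorem pvRmLoop_clean : ∀ (fuel : Nat) (l : List Char), l.length < fuel →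
    rmLoop fuel l = pvClean 0 l := by
  intro fuel
  induction fuel with
  | zero => intro l hl; omega
  | succ fuel ih =>
    intro l hl
    rw [rmLoop]
    show (if (find_parenthesis l).1 = -1 then l
          else if (find_parenthesis l).2 = -1 then
            rmLoop fuel (PySem.Chars.slice l none (some (find_parenthesis l).1))
          else
            rmLoop fuel (PySem.Chars.replace l
              (PySem.Chars.slice l (some (find_parenthesis l).1)
                (some ((find_parenthesis l).2 + 1))) [])) = pvClean 0 l
    by_cases hf : PySem.Chars.find l ['('] = -1
    · have hfp : find_parenthesis l = (-1, -1) := by simp [find_parenthesis, hf]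
      rw [hfp, if_pos rfl]
      have hnot : '(' ∉ l := by
        intro hm
        exact (PySem.Chars.find_ne_neg_one_iff l ['(']).2 ((pvMem_iff_infix l).1 hm) hf
      symm
      simpa [pvClean] using pvClean_no_open l hnot []
    · have h0 : 0 ≤ PySem.Chars.find l ['('] :=
        (PySem.Chars.find_nonneg_iff l ['(']).2 ((PySem.Chars.find_ne_neg_one_iff l ['(']).1 hf)
      obtain ⟨hblt, hcons, hnotin⟩ := pvFind_spec l hf
      set b := (PySem.Chars.find l ['(']).toNat with hbdef
      have hbe : PySem.Chars.find l ['('] = ((b : Nat) : Int) := (Int.toNat_of_nonneg h0).symm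
      have hfp : find_parenthesis l = (PySem.Chars.find l ['('], fpLoop l (b + 1) 1) := by
        simp only [find_parenthesis, if_neg hf, hbdef]
      rw [hfp]
      have hfl := pvFpLoop_eq l l.length (b + 1) 1 (by omega)
      cases hscan : pvScanZ 1 (l.drop (b + 1)) with
      | none =>
        rw [hscan] at hfl
        simp only at hfl
        rw [if_neg (by simpa using hf), if_pos (by simpa using hfl)]
        simp only [PySem.Chars.slice_eq_listSlice]
        rw [hbe, PySem.List.slice_to_natCast]
        rw [ih (l.take b) (by simp; omega)]
        have h1 : pvClean 0 (l.take b) = l.take b := by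
          simpa [pvClean] using pvClean_no_open (l.take b) hnotin []
        have h2 : pvClean 0 l = l.take b := by
          conv_lhs => rw [← List.take_append_drop b l, hcons]
          rw [pvClean_no_open (l.take b) hnotin, pvClean_open]
          rw [pvClean_dead (l.drop (b + 1)) (0 + 1)
            (by simpa using pvScanZ_none_ge (l.drop (b + 1)) 1 le_rfl hscan)]
          simp
        rw [h1, h2]
      | some k =>
        rw [hscan] at hfl
        simp only at hfl
        have hflv : fpLoop l (b + 1) 1 = ((b + 1 + k : Nat) : Int) := hfl
        rw [if_neg (by simpa using hf), if_neg (by rw [hflv]; simp; omega)]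
        simp only [PySem.Chars.slice_eq_listSlice]
        have hcast : fpLoop l (b + 1) 1 + 1 = ((b + k + 2 : Nat) : Int) := by
          rw [hflv]; push_cast; ring
        rw [hbe, hcast, PySem.List.slice_natCast]
        have htk : b + k + 2 - b = k + 2 := by omega
        rw [htk]
        obtain ⟨hk1, hk2, hk3⟩ := pvScanZ_some (l.drop (b + 1)) 1 k hscan
        have hgdef : (l.drop b).take (k + 2) = '(' :: (l.drop (b + 1)).take (k + 1) := by
          rw [hcons, List.take_succ_cons]
        set r := l.drop (b + 1) with hrdef
        set m := r.take (k + 1) with hmdef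
        have hmlen : m.length = k + 1 := by
          rw [hmdef, List.length_take]; omega
        have hgrp : pvGrp ('(' :: m) := by
          refine ⟨m, rfl, by omega, ?_⟩
          intro p hp hne
          have hple : p.length ≤ m.length := hp.length_le
          have hplt : p.length < k + 1 := by
            by_contra hge
            apply hne
            rw [List.prefix_iff_eq_take.1 hp, List.take_of_length_le (by omega)]
          have hpeq : p = r.take p.length := by
            conv_lhs => rw [List.prefix_iff_eq_take.1 hp]
            rw [hmdef, List.take_take, Nat.min_eq_left (by omega)]
          have := hk3 le_rfl p.length (by omega)
          rw [← hpeq] at this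
          omega
        have hginf : ('(' :: m) <:+: l := by
          refine ⟨l.take b, (l.drop b).drop (k + 2), ?_⟩
          rw [← hgdef, List.append_assoc, List.take_append_drop, List.take_append_drop]
        rw [hgdef]
        rw [pvReplace_eq ('(' :: m) l (by simp)]
        rw [ih (pvRmAll ('(' :: m) l)
          ((pvRmAll_length_lt ('(' :: m) (by simp) l hginf).trans_le (by omega))]
        exact pvClean_rmAll ('(' :: m) hgrp l.length l 0 le_rfl le_rfl

theorem remove_note_spec : Claim_equal_remove_note := by
  unfold Claim_equal_remove_note
  intro text _
  unfold Spec_remove_note remove_note remove_note_alt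
  rw [pvRmLoop_clean (text.toList.length + 1) text.toList (by omega)]
  congr 1
  symm
  simpa using pvFoldl_clean text.toList 0 []
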